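-- pv_equiv track=rewrite | github.com/boop34/adventofcode-2020 | day_16/day_16.py | check
-- ===== SOURCE A (Python) =====
-- def check(l, nums):
--     '''
--     this function takes a list(l) and a list of tuples (nums) and checks what
--     tuples successfully marks the boundary of all the element in the list
--     NOTE: in nums two consecutive tuples are related
--
--     it returns a list that holds all the possibility of the list having a
--     boundary index
--     '''
--     # initialize a list
--     ret = []
--     # iterate over every two tuple pairs
--     for j in range(0, len(nums), 2):
--         # unpack the consecutive tuples
--         mi1, ma1 = nums[j]
--         mi2, ma2 = nums[j + 1]
--         # det the flag
--         f = True
--         # iterate over every element of the list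
--         for i in l:
--             # check if the list is in bounds
--             if mi1 <= i <= ma1 or mi2 <= i <= ma2:
--                 pass
--             # otherwise break
--             else:
--                 f = False
--                 break
--         # if succsessful then add the index to the list
--         if f:
--             ret.append(j // 2)
--     # return the list
--     return ret
-- ===== SOURCE B (Python) =====
-- def _fits(r1, r2, i):
--     mi1, ma1 = r1
--     mi2, ma2 = r2
--     return mi1 <= i <= ma1 or mi2 <= i <= ma2
--
--
-- def check(l, nums):
--     # candidate-set re-implementation: loop over elements, shrink the set of
--     # surviving pair indices; early exit when no candidate survives.
--     cand = list(range(len(nums) // 2))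
--     for i in l:
--         cand = [k for k in cand if _fits(nums[2 * k], nums[2 * k + 1], i)]
--         if not cand:
--             break
--     return cand
-- ===== Notes on version B (the rewrite author's own statement) =====
-- stated objective: alternative
-- what changed: Inverts the loop nesting: instead of testing each pair of ranges against the whole list with an inner break, B keeps a shrinking set of candidate pair indices and filters it once per list element, stopping early when it is empty.
import Mathlib
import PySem

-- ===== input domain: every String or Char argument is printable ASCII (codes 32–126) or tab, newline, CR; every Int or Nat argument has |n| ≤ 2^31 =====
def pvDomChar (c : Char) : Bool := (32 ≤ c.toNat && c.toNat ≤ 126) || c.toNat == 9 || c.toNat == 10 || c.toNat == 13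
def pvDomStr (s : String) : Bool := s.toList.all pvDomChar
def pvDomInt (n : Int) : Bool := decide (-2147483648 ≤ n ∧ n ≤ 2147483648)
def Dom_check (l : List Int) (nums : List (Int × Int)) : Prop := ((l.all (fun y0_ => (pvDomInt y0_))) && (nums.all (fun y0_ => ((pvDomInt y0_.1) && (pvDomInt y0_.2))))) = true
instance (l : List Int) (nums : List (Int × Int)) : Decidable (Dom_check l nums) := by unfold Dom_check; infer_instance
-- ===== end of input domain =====

-- B inverts the loop nesting (elements outer, candidate pair-indices inner, kept as a
-- shrinking filtered list with early exit); same cost, alternative decomposition.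
-- ===== PORT A =====
-- inner 'for i in l' loop with its break: returns the flag f
def checkInner (mi1 ma1 mi2 ma2 : Int) : List Int → Bool
  | [] => true
  | i :: rest =>
      if (mi1 ≤ i ∧ i ≤ ma1) ∨ (mi2 ≤ i ∧ i ≤ ma2) then checkInner mi1 ma1 mi2 ma2 rest
      else false

def check (l : List Int) (nums : List (Int × Int)) : List Int :=
  (PySem.List.pyRange 0 (nums.length : Int) 2).foldl (fun ret j =>
    match PySem.List.pyGet? nums j, PySem.List.pyGet? nums (j + 1) with
    | some (mi1, ma1), some (mi2, ma2) =>
        if checkInner mi1 ma1 mi2 ma2 l then ret ++ [PySem.Int.floordiv j 2] else ret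
    | _, _ => ret) []   -- the none case is Python's IndexError, excluded by Pre_check

-- ===== PORT B =====
-- _fits(nums[2*k], nums[2*k+1], i); none = IndexError, unreachable for k < len(nums)//2
def fitsAt (nums : List (Int × Int)) (k i : Int) : Bool :=
  match PySem.List.pyGet? nums (2 * k) with
  | some (mi1, ma1) =>
      match PySem.List.pyGet? nums (2 * k + 1) with
      | some (mi2, ma2) => decide ((mi1 ≤ i ∧ i ≤ ma1) ∨ (mi2 ≤ i ∧ i ≤ ma2))
      | none => false
  | none => false

-- the 'for i in l' loop over the candidate list, with the early break
def altGo (nums : List (Int × Int)) : List Int → List Int → List Int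
  | [], cand => cand
  | i :: rest, cand =>
      let c := cand.filter (fun k => fitsAt nums k i)
      if c = [] then [] else altGo nums rest c

def check_alt (l : List Int) (nums : List (Int × Int)) : List Int :=
  altGo nums l (PySem.List.pyRange 0 (PySem.Int.floordiv (nums.length : Int) 2) 1)

-- ===== PRECONDITION & SPEC =====
-- A reads nums[j+1] for the last even j, so any odd-length nums raises IndexError.
def Pre_check (l : List Int) (nums : List (Int × Int)) : Prop := nums.length % 2 = 0
instance (l : List Int) (nums : List (Int × Int)) : Decidable (Pre_check l nums) := by unfold Pre_check; infer_instance
def pvWitness_check : List Int × (List (Int × Int)) := ([1, 6], [(0, 2), (5, 8)])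

def Spec_check (l : List Int) (nums : List (Int × Int)) (out : List Int) : Prop := out = check_alt l nums
instance (l : List Int) (nums : List (Int × Int)) (out : List Int) : Decidable (Spec_check l nums out) := by unfold Spec_check; infer_instance

-- ===== CLAIM (what is proved, stated in full; the proofs are below) =====
def Claim_equal_check : Prop := ∀ (l : List Int) (nums : List (Int × Int)), Dom_check l nums → Pre_check l nums → Spec_check l nums (check l nums)

-- ===== LEMMAS AND PROOFS =====

-- per-pair predicate A tests: both tuples exist and every element of l fits
def okPair (nums : List (Int × Int)) (l : List Int) (j : Int) : Bool :=
  match PySem.List.pyGet? nums j, PySem.List.pyGet? nums (j + 1) with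
  | some (mi1, ma1), some (mi2, ma2) => checkInner mi1 ma1 mi2 ma2 l
  | _, _ => false

lemma afold_eq (nums : List (Int × Int)) (l : List Int) :
    (fun (ret : List Int) (j : Int) =>
      match PySem.List.pyGet? nums j, PySem.List.pyGet? nums (j + 1) with
      | some (mi1, ma1), some (mi2, ma2) =>
          if checkInner mi1 ma1 mi2 ma2 l then ret ++ [PySem.Int.floordiv j 2] else ret
      | _, _ => ret)
    = (fun ret j => if okPair nums l j then ret ++ [PySem.Int.floordiv j 2] else ret) := by
  funext ret j
  unfold okPair
  rcases PySem.List.pyGet? nums j with _ | ⟨a, b⟩ <;>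
    rcases PySem.List.pyGet? nums (j + 1) with _ | ⟨c, d⟩ <;> simp

lemma checkInner_eq_all (a b c d : Int) (l : List Int) :
    checkInner a b c d l = l.all (fun i => decide ((a ≤ i ∧ i ≤ b) ∨ (c ≤ i ∧ i ≤ d))) := by
  induction l with
  | nil => rfl
  | cons i rest ih =>
      by_cases h : (a ≤ i ∧ i ≤ b) ∨ (c ≤ i ∧ i ≤ d) <;> simp [checkInner, h, ih]

lemma ok_eq_fits (nums : List (Int × Int)) (l : List Int) (k : Nat)
    (h : 2 * k + 1 < nums.length) :
    okPair nums l (2 * (k : Int)) = l.all (fun i => fitsAt nums (k : Int) i) := by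
  have h1 : PySem.List.pyGet? nums (2 * (k : Int)) = some nums[2 * k] := by
    have := PySem.List.pyGet?_ofNat nums (2 * k) (by omega)
    push_cast at this; exact this
  have h2 : PySem.List.pyGet? nums (2 * (k : Int) + 1) = some nums[2 * k + 1] := by
    have := PySem.List.pyGet?_ofNat nums (2 * k + 1) (by omega)
    push_cast at this; exact this
  rcases hx : nums[2 * k] with ⟨a, b⟩
  rcases hy : nums[2 * k + 1] with ⟨c, d⟩
  rw [hx] at h1; rw [hy] at h2
  simp only [okPair, fitsAt, h1, h2]
  exact checkInner_eq_all a b c d l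

lemma altGo_eq (nums : List (Int × Int)) (l : List Int) :
    ∀ cand : List Int,
      altGo nums l cand = cand.filter (fun k => l.all (fun i => fitsAt nums k i)) := by
  induction l with
  | nil => intro cand; simp [altGo]
  | cons i rest ih =>
      intro cand
      have hsplit : cand.filter (fun k => (i :: rest).all (fun j => fitsAt nums k j))
          = (cand.filter (fun k => fitsAt nums k i)).filter
              (fun k => rest.all (fun j => fitsAt nums k j)) := by
        rw [List.filter_filter]
        refine List.filter_congr ?_
        intro k _
        simp [List.all_cons, Bool.and_comm]
      show (if cand.filter (fun k => fitsAt nums k i) = [] then []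
            else altGo nums rest (cand.filter (fun k => fitsAt nums k i)))
          = cand.filter (fun k => (i :: rest).all fun j => fitsAt nums k j)
      rw [hsplit]
      by_cases hc : cand.filter (fun k => fitsAt nums k i) = []
      · rw [if_pos hc, hc]; simp
      · rw [if_neg hc, ih]

theorem check_eq_alt (l : List Int) (nums : List (Int × Int))
    (hpre : nums.length % 2 = 0) : check l nums = check_alt l nums := by
  set m : Nat := nums.length / 2 with hmdef
  have hm : nums.length = 2 * m := by omega
  -- A side
  have hA : check l nums
      = ((List.range m).filter (fun k : Nat => okPair nums l (2 * (k : Int)))).map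
          (fun k : Nat => (k : Int)) := by
    unfold check
    rw [afold_eq, PySem.List.foldl_append_if, PySem.List.pyRange_of_pos 0 (nums.length : Int)
      (by norm_num)]
    have hN : (if (0 : Int) < (nums.length : Int)
        then (((nums.length : Int) - 0 + 2 - 1) / 2).toNat else 0) = m := by
      split <;> omega
    rw [hN]
    simp only [List.nil_append]
    rw [List.filter_map, List.map_map]
    simp only [Function.comp_def, zero_add]
    refine List.map_congr_left ?_
    intro k _
    show PySem.Int.floordiv (2 * (k : Int)) 2 = (k : Int)
    rw [PySem.Int.floordiv_eq_ediv_of_pos (by norm_num)]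
    omega
  -- B side
  have hB : check_alt l nums
      = ((List.range m).filter (fun k : Nat => l.all (fun i => fitsAt nums (k : Int) i))).map
          (fun k : Nat => (k : Int)) := by
    unfold check_alt
    rw [altGo_eq]
    have hfd : PySem.Int.floordiv (nums.length : Int) 2 = (m : Int) := by
      rw [PySem.Int.floordiv_eq_ediv_of_pos (by norm_num)]
      omega
    rw [hfd, PySem.List.pyRange_one]
    have : ((m : Int) - 0).toNat = m := by omega
    rw [this, List.filter_map]
    simp only [Function.comp_def, zero_add]
  rw [hA, hB]
  congr 1
  refine List.filter_congr ?_
  intro k hk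
  have hk' : k < m := List.mem_range.mp hk
  have := ok_eq_fits nums l k (by omega)
  simpa [Function.comp] using this

-- ===== VERDICT (by name: the statement is the Claim_ definition above) =====
theorem check_spec : Claim_equal_check := by
  intro l nums _ hpre
  unfold Spec_check
  exact check_eq_alt l nums hpre
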